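-- pv_equiv track=rewrite | github.com/JKR8/querytorque_v8 | packages/qt-dax/qt_dax/renderers/dax_renderer.py | _build_headline
-- ===== SOURCE A (Python) =====
-- def _build_headline(all_issues: list, severity_counts: dict) -> str:
--     """Build headline text from issues."""
--     critical = severity_counts.get('critical', 0)
--     high = severity_counts.get('high', 0)
--     total = sum(severity_counts.values())
--
--     if critical > 0:
--         critical_issues = [i for i in all_issues if i.get('severity') == 'critical']
--         if critical_issues:
--             categories = {}
--             for issue in critical_issues:
--                 cat = issue.get('category', 'unknown')
--                 categories[cat] = categories.get(cat, 0) + 1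
--
--             top_cat = max(categories.items(), key=lambda x: x[1])
--
--             if top_cat[0] == 'date_table' or any(i.get('rule_id') == 'MDL001' for i in critical_issues):
--                 date_count = len([i for i in critical_issues if i.get('rule_id') == 'MDL001' or i.get('category') == 'date_table'])
--                 if date_count > 0:
--                     return f"{date_count} auto date/time tables consuming unnecessary space"
--             elif top_cat[0] == 'dax_anti_pattern':
--                 return f"{critical} critical DAX anti-patterns detected"
--             elif top_cat[0] == 'model_structure' or top_cat[0] == 'cardinality':
--                 return f"{critical} critical model structure issues found"
--             else:
--                 return f"{critical} critical issues require immediate attention"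
--
--     if high > 0:
--         return f"{high} high-severity optimization opportunities identified"
--
--     if total > 0:
--         return f"Model analysis complete: {total} improvement opportunities"
--
--     return "Model analysis complete: No significant issues found"
-- ===== SOURCE B (Python) =====
-- def _build_headline(all_issues: list, severity_counts: dict) -> str:
--     """Build headline text from issues (single pass over all_issues)."""
--     critical = severity_counts.get('critical', 0)
--     high = severity_counts.get('high', 0)
--     total = sum(severity_counts.values())
--
--     if critical > 0:
--         categories = {}
--         date_count = 0
--         has_mdl001 = False
--         for issue in all_issues:
--             if issue.get('severity') == 'critical':
--                 cat = issue.get('category', 'unknown')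
--                 categories[cat] = categories.get(cat, 0) + 1
--                 if issue.get('rule_id') == 'MDL001' or issue.get('category') == 'date_table':
--                     date_count += 1
--                 has_mdl001 = has_mdl001 or issue.get('rule_id') == 'MDL001'
--
--         top_cat = None
--         top_n = 0
--         for cat, n in categories.items():
--             if n > top_n:
--                 top_cat, top_n = cat, n
--
--         if top_cat is not None:
--             if top_cat == 'date_table' or has_mdl001:
--                 return f"{date_count} auto date/time tables consuming unnecessary space"
--             if top_cat == 'dax_anti_pattern':
--                 return f"{critical} critical DAX anti-patterns detected"
--             if top_cat == 'model_structure' or top_cat == 'cardinality':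
--                 return f"{critical} critical model structure issues found"
--             return f"{critical} critical issues require immediate attention"
--
--     if high > 0:
--         return f"{high} high-severity optimization opportunities identified"
--
--     if total > 0:
--         return f"Model analysis complete: {total} improvement opportunities"
--
--     return "Model analysis complete: No significant issues found"
-- ===== Notes on version B (the rewrite author's own statement) =====
-- stated objective: simpler
-- what changed: A's four separate scans over the critical-issue sublist (a filter, a grouping loop, an any(), and a len(filter)) are fused into one pass over all_issues that builds the category counts, the date count and the MDL001 flag together; max(items, key=...) is replaced by an explicit strict-greater running-argmax (which also subsumes the emptiness check), and the provably dead 'if date_count > 0' guard is dropped.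
import Mathlib
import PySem

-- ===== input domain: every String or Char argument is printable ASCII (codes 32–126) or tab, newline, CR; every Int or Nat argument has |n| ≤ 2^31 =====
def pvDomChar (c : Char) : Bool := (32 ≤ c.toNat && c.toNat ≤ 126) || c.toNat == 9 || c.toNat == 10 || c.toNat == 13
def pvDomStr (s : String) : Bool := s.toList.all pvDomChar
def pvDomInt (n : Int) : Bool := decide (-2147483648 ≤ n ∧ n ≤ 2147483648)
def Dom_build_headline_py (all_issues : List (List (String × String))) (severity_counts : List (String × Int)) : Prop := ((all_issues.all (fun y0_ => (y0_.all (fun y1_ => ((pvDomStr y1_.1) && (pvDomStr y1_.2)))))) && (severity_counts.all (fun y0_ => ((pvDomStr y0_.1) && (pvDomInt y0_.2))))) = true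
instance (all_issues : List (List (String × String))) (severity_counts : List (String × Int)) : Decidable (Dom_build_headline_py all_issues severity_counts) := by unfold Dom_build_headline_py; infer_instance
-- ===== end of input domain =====

-- B fuses A's four scans over the critical issues into one pass over all_issues and
-- replaces max(items, key=...) by an explicit running argmax; objective: simpler.

-- shared dict-access helpers (Python's issue.get(k) / issue.get(k, d) on an issue dict)
def pvGet (i : List (String × String)) (k : String) : Option String :=
  (PySem.Dict.ofList i).get? k
def pvGetD (i : List (String × String)) (k d : String) : String :=
  (PySem.Dict.ofList i).getD k d

-- ===== PORT A =====
-- the fall-through block (the high/total/default returns) both Pythons end with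
def pvTail (high total : Int) : String :=
  if high > 0 then PySem.Int.toStr high ++ " high-severity optimization opportunities identified"
  else if total > 0 then "Model analysis complete: " ++ PySem.Int.toStr total ++ " improvement opportunities"
  else "Model analysis complete: No significant issues found"

def build_headline_py (all_issues : List (List (String × String))) (severity_counts : List (String × Int)) : String :=
  let sc := PySem.Dict.ofList severity_counts
  let critical := sc.getD "critical" 0
  let high := sc.getD "high" 0
  let total := sc.values.sum
  if critical > 0 then
    let critical_issues := all_issues.filter (fun i => pvGet i "severity" == some "critical")
    if critical_issues.isEmpty then pvTail high total
    else
      let categories := critical_issues.foldl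
        (fun d issue =>
          let cat := pvGetD issue "category" "unknown"
          d.insert cat (d.getD cat 0 + 1)) (PySem.Dict.empty : PySem.Dict String Int)
      match PySem.List.max? categories.items (fun x => x.2) with
      | none => pvTail high total
      | some top_cat =>
        if top_cat.1 == "date_table" || critical_issues.any (fun i => pvGet i "rule_id" == some "MDL001") then
          let date_count : Int :=
            ((critical_issues.filter (fun i => pvGet i "rule_id" == some "MDL001" || pvGet i "category" == some "date_table")).length : Int)
          if date_count > 0 then PySem.Int.toStr date_count ++ " auto date/time tables consuming unnecessary space"
          else pvTail high total
        else if top_cat.1 == "dax_anti_pattern" then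
          PySem.Int.toStr critical ++ " critical DAX anti-patterns detected"
        else if top_cat.1 == "model_structure" || top_cat.1 == "cardinality" then
          PySem.Int.toStr critical ++ " critical model structure issues found"
        else
          PySem.Int.toStr critical ++ " critical issues require immediate attention"
  else pvTail high total

-- ===== PORT B =====
-- loop state: (categories, date_count, has_mdl001)
def pvStepB (st : PySem.Dict String Int × Int × Bool) (issue : List (String × String)) :
    PySem.Dict String Int × Int × Bool :=
  if pvGet issue "severity" == some "critical" then
    let cat := pvGetD issue "category" "unknown"
    (st.1.insert cat (st.1.getD cat 0 + 1),
     (if pvGet issue "rule_id" == some "MDL001" || pvGet issue "category" == some "date_table" then st.2.1 + 1 else st.2.1),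
     (st.2.2 || (pvGet issue "rule_id" == some "MDL001")))
  else st

def build_headline_py_alt (all_issues : List (List (String × String))) (severity_counts : List (String × Int)) : String :=
  let sc := PySem.Dict.ofList severity_counts
  let critical := sc.getD "critical" 0
  let high := sc.getD "high" 0
  let total := sc.values.sum
  if critical > 0 then
    let st := all_issues.foldl pvStepB (PySem.Dict.empty, 0, false)
    let best := st.1.items.foldl
      (fun (b : Option String × Int) p => if p.2 > b.2 then (some p.1, p.2) else b) (none, 0)
    match best.1 with
    | some top_cat =>
      if top_cat == "date_table" || st.2.2 then
        PySem.Int.toStr st.2.1 ++ " auto date/time tables consuming unnecessary space"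
      else if top_cat == "dax_anti_pattern" then
        PySem.Int.toStr critical ++ " critical DAX anti-patterns detected"
      else if top_cat == "model_structure" || top_cat == "cardinality" then
        PySem.Int.toStr critical ++ " critical model structure issues found"
      else
        PySem.Int.toStr critical ++ " critical issues require immediate attention"
    | none => pvTail high total
  else pvTail high total

-- ===== PRECONDITION & SPEC =====
def Spec_build_headline_py (all_issues : List (List (String × String))) (severity_counts : List (String × Int)) (out : String) : Prop := out = build_headline_py_alt all_issues severity_counts
instance (all_issues : List (List (String × String))) (severity_counts : List (String × Int)) (out : String) : Decidable (Spec_build_headline_py all_issues severity_counts out) := by unfold Spec_build_headline_py; infer_instance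

-- ===== CLAIM (what is proved, stated in full; the proofs are below) =====
def Claim_equal_build_headline_py : Prop := ∀ (all_issues : List (List (String × String))) (severity_counts : List (String × Int)), Dom_build_headline_py all_issues severity_counts → Spec_build_headline_py all_issues severity_counts (build_headline_py all_issues severity_counts)

-- ===== LEMMAS AND PROOFS =====

-- the three predicates and the key function the two loops share
def pvCritP (i : List (String × String)) : Bool := pvGet i "severity" == some "critical"
def pvCatD (i : List (String × String)) : String := pvGetD i "category" "unknown"
def pvQP (i : List (String × String)) : Bool :=
  pvGet i "rule_id" == some "MDL001" || pvGet i "category" == some "date_table"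
def pvRP (i : List (String × String)) : Bool := pvGet i "rule_id" == some "MDL001"

-- B's guarded step over the whole list = the unguarded body over the filtered list
def pvBodyB (st : PySem.Dict String Int × Int × Bool) (issue : List (String × String)) :
    PySem.Dict String Int × Int × Bool :=
  (st.1.insert (pvCatD issue) (st.1.getD (pvCatD issue) 0 + 1),
   (if pvQP issue then st.2.1 + 1 else st.2.1),
   (st.2.2 || pvRP issue))

theorem pvStepB_eq : pvStepB = fun st i => if pvCritP i then pvBodyB st i else st := rfl

theorem pvFoldB_filter (a : List (List (String × String)))
    (st : PySem.Dict String Int × Int × Bool) :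
    a.foldl pvStepB st = (a.filter pvCritP).foldl pvBodyB st := by
  rw [pvStepB_eq]
  exact (List.foldl_filter ..).symm

-- the fused loop splits into its three independent components
theorem pvCombo (l : List (List (String × String)))
    (cats : PySem.Dict String Int) (dc : Int) (md : Bool) :
    l.foldl pvBodyB (cats, dc, md) =
      (l.foldl (fun d issue => d.insert (pvCatD issue) (d.getD (pvCatD issue) 0 + 1)) cats,
       dc + (l.countP pvQP : Int),
       md || l.any pvRP) := by
  induction l generalizing cats dc md with
  | nil => simp
  | cons x t ih =>
    simp only [List.foldl_cons, pvBodyB, ih, List.countP_cons, List.any_cons, Prod.mk.injEq,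
      true_and]
    constructor
    · by_cases h : pvQP x = true
      · simp [h]
        ring
      · simp [h]
    · by_cases h : pvRP x = true <;> simp [h]

-- the grouping loop is a Counter over the mapped categories
theorem pvCats_counter (l : List (List (String × String))) :
    l.foldl (fun d issue => d.insert (pvCatD issue) (d.getD (pvCatD issue) 0 + 1))
        PySem.Dict.empty =
      PySem.Dict.counter (l.map pvCatD) := by
  rw [← PySem.Dict.foldl_insert_getD_add_one_eq_counter, List.foldl_map]

-- B's whole pass, assembled
theorem pvFoldB_eq (a : List (List (String × String))) :
    a.foldl pvStepB (PySem.Dict.empty, 0, false) =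
      (PySem.Dict.counter ((a.filter pvCritP).map pvCatD),
       (((a.filter pvCritP).countP pvQP : Nat) : Int),
       (a.filter pvCritP).any pvRP) := by
  rw [pvFoldB_filter, pvCombo, pvCats_counter]
  simp

-- every value stored in a Counter is at least 1
theorem pvCounter_items_pos (xs : List String) (p : String × Int)
    (hp : p ∈ (PySem.Dict.counter xs).items) : 1 ≤ p.2 := by
  rw [PySem.Dict.items_counter] at hp
  obtain ⟨k, hk, rfl⟩ := List.mem_map.1 hp
  have : k ∈ xs := (PySem.Set.mem_ofList _ _).1 hk
  have : 0 < xs.count k := List.count_pos_iff.2 this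
  simpa using this

theorem pvCounter_items_ne_nil (xs : List String) (h : xs ≠ []) :
    (PySem.Dict.counter xs).items ≠ [] := by
  rw [PySem.Dict.items_counter]
  obtain ⟨x, t, rfl⟩ := List.exists_cons_of_ne_nil h
  have hx : x ∈ PySem.Set.ofList (x :: t) := (PySem.Set.mem_ofList _ _).2 (List.mem_cons_self ..)
  exact List.ne_nil_of_mem (List.mem_map_of_mem hx)

-- B's running argmax computes Python's max(items, key=snd) when all values are ≥ 1
def pvWrap (o : Option (String × Int)) : Option String × Int :=
  match o with
  | none => (none, 0)
  | some m => (some m.1, m.2)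
theorem pvMaxFold_aux (g : Option (String × Int) → (String × Int) → Option (String × Int))
    (hg : ∀ m x, g (some m) x = if m.2 < x.2 then some x else some m)
    (l : List (String × Int)) (m : String × Int) :
    l.foldl (fun (b : Option String × Int) p => if p.2 > b.2 then (some p.1, p.2) else b)
        (some m.1, m.2) =
      pvWrap (l.foldl g (some m)) := by
  induction l generalizing m with
  | nil => rfl
  | cons x t ih =>
    simp only [List.foldl_cons, hg]
    by_cases h : m.2 < x.2
    · rw [if_pos h, if_pos (show x.2 > (some m.1, m.2).2 from h)]
      exact ih x
    · rw [if_neg h, if_neg (show ¬ x.2 > (some m.1, m.2).2 from h)]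
      exact ih m

theorem pvMaxFold (l : List (String × Int)) (hpos : ∀ p ∈ l, 1 ≤ p.2) :
    l.foldl (fun (b : Option String × Int) p => if p.2 > b.2 then (some p.1, p.2) else b)
        ((none : Option String), (0 : Int)) =
      pvWrap (PySem.List.max? l (fun x => x.2)) := by
  cases l with
  | nil => rfl
  | cons x t =>
    have hx : (1 : Int) ≤ x.2 := hpos x (List.mem_cons_self ..)
    simp only [PySem.List.max?, List.foldl_cons]
    rw [if_pos (show x.2 > ((none : Option String), (0:Int)).2 by simpa using lt_of_lt_of_le one_pos hx)]
    exact pvMaxFold_aux _ (fun m x => rfl) t x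

-- a "date_table" category or an MDL001 rule makes the date count positive
theorem pvDate_pos_of_any (ci : List (List (String × String))) (h : ci.any pvRP = true) :
    0 < ci.countP pvQP := by
  obtain ⟨i, hi, hri⟩ := List.any_eq_true.1 h
  exact List.countP_pos_iff.2 ⟨i, hi, by simp [pvQP, pvRP] at hri ⊢; exact Or.inl hri⟩

theorem pvDate_pos_of_cat (ci : List (List (String × String)))
    (h : "date_table" ∈ ci.map pvCatD) : 0 < ci.countP pvQP := by
  obtain ⟨i, hi, hcat⟩ := List.mem_map.1 h
  refine List.countP_pos_iff.2 ⟨i, hi, ?_⟩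
  have : pvGet i "category" = some "date_table" := by
    have hg := PySem.Dict.getD_eq_get?_getD (PySem.Dict.ofList i) "category" "unknown"
    simp only [pvCatD, pvGetD] at hcat
    rw [hg] at hcat
    cases hget : (PySem.Dict.ofList i).get? "category" with
    | none => rw [hget] at hcat; simp at hcat
    | some s => rw [hget] at hcat; simp at hcat; simp [pvGet, hget, hcat]
  simp [pvQP, this]

@[simp] theorem pvCritP_eq (i : List (String × String)) :
    (pvGet i "severity" == some "critical") = pvCritP i := rfl
@[simp] theorem pvCatD_eq (i : List (String × String)) :
    pvGetD i "category" "unknown" = pvCatD i := rfl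
@[simp] theorem pvQP_eq (i : List (String × String)) :
    (pvGet i "rule_id" == some "MDL001" || pvGet i "category" == some "date_table") = pvQP i := rfl
@[simp] theorem pvRP_eq (i : List (String × String)) :
    (pvGet i "rule_id" == some "MDL001") = pvRP i := rfl

-- the main equivalence
theorem pvMain (all_issues : List (List (String × String)))
    (severity_counts : List (String × Int)) :
    build_headline_py all_issues severity_counts =
      build_headline_py_alt all_issues severity_counts := by
  unfold build_headline_py build_headline_py_alt
  simp only [pvFoldB_eq]
  set sc := PySem.Dict.ofList severity_counts with hsc
  by_cases hc : sc.getD "critical" 0 > 0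
  · simp only [if_pos hc, pvCritP_eq, pvCatD_eq, pvQP_eq]
    simp only [pvRP_eq]
    have hfil : (List.filter (fun i => pvCritP i) all_issues) = List.filter pvCritP all_issues := rfl
    have hfq : (fun i => pvQP i) = pvQP := rfl
    have hfr : (fun i => pvRP i) = pvRP := rfl
    simp only [hfil, hfq, hfr]
    rw [pvCats_counter]
    by_cases hnil : all_issues.filter pvCritP = []
    · simp [hnil]
      rfl
    · have hxs : (all_issues.filter pvCritP).map pvCatD ≠ [] := by
        simpa using hnil
      have hne := pvCounter_items_ne_nil _ hxs
      obtain ⟨m, hm⟩ : ∃ m, PySem.List.max?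
          ((PySem.Dict.counter ((all_issues.filter pvCritP).map pvCatD)).items)
          (fun x => x.2) = some m := by
        cases h : PySem.List.max?
            ((PySem.Dict.counter ((all_issues.filter pvCritP).map pvCatD)).items)
            (fun x => x.2) with
        | none => exact absurd ((PySem.List.max?_eq_none_iff _ _).1 h) hne
        | some m => exact ⟨m, rfl⟩
      have hiE : (all_issues.filter pvCritP).isEmpty = false := by
        simpa [List.isEmpty_iff] using hnil
      rw [pvMaxFold _ (pvCounter_items_pos _), hm]
      simp only [hiE, Bool.false_eq_true, if_false, pvWrap]
      by_cases hcond : (m.1 == "date_table" || (all_issues.filter pvCritP).any pvRP) = true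
      · simp only [hcond, if_pos]
        have hpos : 0 < (all_issues.filter pvCritP).countP pvQP := by
          rcases Bool.or_eq_true_iff.1 hcond with h | h
          · have hmd : m.1 = "date_table" := by simpa using h
            have hmem := PySem.List.max?_mem hm
            rw [PySem.Dict.items_counter] at hmem
            obtain ⟨k, hk, hkm⟩ := List.mem_map.1 hmem
            have hk1 : m.1 = k := by rw [← hkm]
            exact pvDate_pos_of_cat _ (by
              rw [← hmd.symm.trans hk1] at hk
              exact (PySem.Set.mem_ofList _ _).1 hk)
          · exact pvDate_pos_of_any _ h
        have hlen : ((all_issues.filter pvCritP).countP pvQP : Int) =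
            (((all_issues.filter pvCritP).filter pvQP).length : Int) := by
          rw [List.countP_eq_length_filter]
        rw [if_pos (by rw [← hlen]; exact_mod_cast hpos), ← hlen]
      · simp only [hcond, Bool.false_eq_true, if_false]
  · simp [hc]

-- ===== VERDICT (by name: the statement is the Claim_ definition above) =====
theorem build_headline_py_spec : Claim_equal_build_headline_py := by
  intro a s _
  unfold Spec_build_headline_py
  exact pvMain a s
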